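-- pv_equiv track=rewrite | github.com/jgm0327/baekjoon | 프로그래머스/unrated/138476. 귤 고르기/귤 고르기.py | solution
-- ===== SOURCE A (Python) =====
-- import heapq
--
-- def solution(k, tangerine):
--     answer = 0
--     tangerines = {}
--
--     for t in tangerine:
--         if tangerines.get(t) != None:
--             tangerines[t] += 1
--         else:
--             tangerines[t] = 1
--     heap = []
--     for data in tangerines.values():
--         heapq.heappush(heap, -data)
--     while heap:
--         cnt = heapq.heappop(heap)
--         answer += 1
--         if k <= -cnt:
--             break
--         k += cnt
--     return answer
-- ===== SOURCE B (Python) =====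
-- def solution(k, tangerine):
--     freq = {}
--     for t in tangerine:
--         freq[t] = freq.get(t, 0) + 1
--     bucket = {}
--     for c in freq.values():
--         bucket[c] = bucket.get(c, 0) + 1
--     answer = 0
--     for c in range(len(tangerine), 0, -1):
--         m = bucket.get(c, 0)
--         if m == 0:
--             continue
--         if k <= m * c:
--             return answer + max(1, -(-k // c))
--         answer += m
--         k -= m * c
--     return answer
-- ===== Notes on version B (the rewrite author's own statement) =====
-- stated objective: alternative
-- what changed: Replaced the heap of negated counts popped one element at a time with a bucket dict counting how many kinds share each frequency, consumed by a single countdown over possible frequencies that takes whole buckets at once and closes the last bucket with a ceiling division instead of stepping through it.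
import Mathlib
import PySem

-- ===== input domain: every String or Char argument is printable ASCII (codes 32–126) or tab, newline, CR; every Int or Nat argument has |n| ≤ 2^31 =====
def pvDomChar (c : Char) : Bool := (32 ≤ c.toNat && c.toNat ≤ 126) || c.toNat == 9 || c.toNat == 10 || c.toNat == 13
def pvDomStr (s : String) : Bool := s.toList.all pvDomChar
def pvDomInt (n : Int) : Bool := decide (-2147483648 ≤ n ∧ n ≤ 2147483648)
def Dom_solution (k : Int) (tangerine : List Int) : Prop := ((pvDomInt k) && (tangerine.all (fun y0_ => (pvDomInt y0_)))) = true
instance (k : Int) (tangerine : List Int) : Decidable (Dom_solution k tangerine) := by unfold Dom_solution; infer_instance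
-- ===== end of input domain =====

-- B replaces A's heap of negated counts (popped one by one) with a bucket dict counting how many
-- kinds share each frequency and one arithmetic countdown scan (ceil division closes each bucket);
-- no heap and no sort; same return value, proved equal on all inputs.


-- ===== PORT A =====
-- heapq.heappush on an Int heap, ported by hand as ordered insertion: exact here because the
-- heap's elements are Ints compared by value only, and heapq pops them in nondecreasing value
-- order — exactly the order ordered insertion maintains (the popped VALUE sequence is identical).
def heapPush (h : List Int) (x : Int) : List Int :=
  PySem.List.insertBy (fun a b => decide (a < b)) x h

-- the 'while heap:' loop of A: pop the smallest (head), count it, stop or continue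
def heapLoop (k : Int) (answer : Int) (heap : List Int) : Int :=
  match heap with
  | [] => answer
  | cnt :: rest => if k ≤ -cnt then answer + 1 else heapLoop (k + cnt) (answer + 1) rest

def solution (k : Int) (tangerine : List Int) : Int :=
  let tangerines := tangerine.foldl (fun d t =>
    match d.get? t with
    | some v => d.insert t (v + 1)
    | none => d.insert t 1) (PySem.Dict.empty : PySem.Dict Int Int)
  let heap := tangerines.values.foldl (fun h data => heapPush h (-data)) []
  heapLoop k 0 heap

-- ===== PORT B =====
-- Source B's countdown over range(len(tangerine), 0, -1): whole buckets are taken at once,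
-- the final bucket is closed by the ceiling division max(1, -(-k // c))
def bucketLoop (bucket : PySem.Dict Int Int) (k answer : Int) (cs : List Int) : Int :=
  match cs with
  | [] => answer
  | c :: rest =>
    let m := bucket.getD c 0
    if m = 0 then bucketLoop bucket k answer rest
    else if k ≤ m * c then answer + max 1 (-(PySem.Int.floordiv (-k) c))
    else bucketLoop bucket (k - m * c) (answer + m) rest

def solution_alt (k : Int) (tangerine : List Int) : Int :=
  let freq := tangerine.foldl (fun d t => d.insert t (d.getD t 0 + 1)) (PySem.Dict.empty : PySem.Dict Int Int)
  let bucket := freq.values.foldl (fun d c => d.insert c (d.getD c 0 + 1)) (PySem.Dict.empty : PySem.Dict Int Int)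
  bucketLoop bucket k 0 (PySem.List.pyRange (tangerine.length : Int) 0 (-1))

-- ===== PRECONDITION & SPEC =====
def Spec_solution (k : Int) (tangerine : List Int) (out : Int) : Prop := out = solution_alt k tangerine
instance (k : Int) (tangerine : List Int) (out : Int) : Decidable (Spec_solution k tangerine out) := by unfold Spec_solution; infer_instance

-- ===== CLAIM (what is proved, stated in full; the proofs are below) =====
def Claim_equal_solution : Prop := ∀ (k : Int) (tangerine : List Int), Dom_solution k tangerine → Spec_solution k tangerine (solution k tangerine)

-- ===== LEMMAS AND PROOFS =====

-- proof-only reference loop: one-by-one scan over the descending multiset of counts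
def descLoop (k : Int) (answer : Int) (cs : List Int) : Int :=
  match cs with
  | [] => answer
  | c :: rest => if k ≤ c then answer + 1 else descLoop (k - c) (answer + 1) rest

-- ---- A-side: solution = descLoop over the descending sort of the counter's values ----

lemma counts_eq (tangerine : List Int) :
    tangerine.foldl (fun d t =>
      match d.get? t with
      | some v => d.insert t (v + 1)
      | none => d.insert t 1) (PySem.Dict.empty (κ := Int) (ν := Int))
    = tangerine.foldl (fun d t => d.insert t (d.getD t 0 + 1)) PySem.Dict.empty := by
  have hstep : (fun (d : PySem.Dict Int Int) t =>
      match d.get? t with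
      | some v => d.insert t (v + 1)
      | none => d.insert t 1)
      = fun d t => d.insert t (d.getD t 0 + 1) := by
    funext d t
    cases h : d.get? t with
    | none => simp [PySem.Dict.getD_eq_get?_getD, h]
    | some v => simp [PySem.Dict.getD_eq_get?_getD, h]
  rw [hstep]

lemma heap_eq_sorted (vs : List Int) :
    vs.foldl (fun h data => heapPush h (-data)) []
    = PySem.List.sorted (vs.map fun x : Int => -x) (fun x => x) false := by
  rw [PySem.List.sorted_eq_foldl_insertBy, ← List.foldl_map]
  rfl

lemma sorted_neg (vs : List Int) :
    PySem.List.sorted (vs.map fun x : Int => -x) (fun x => x) false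
    = (PySem.List.sorted vs (fun x => x) true).map fun x : Int => -x := by
  apply PySem.List.eq_of_perm_of_pairwise_le_of_injective (fun x : Int => x)
    (fun a b h => h)
  · exact (PySem.List.sorted_perm _ _ _).trans
      ((PySem.List.sorted_perm vs (fun x => x) true).map fun x : Int => -x).symm
  · exact PySem.List.sorted_pairwise _ _
  · have h := PySem.List.sorted_pairwise_rev vs (fun x => x)
    exact (List.pairwise_map).mpr (h.imp (fun hab => neg_le_neg hab))

lemma loops_eq (cs : List Int) : ∀ (k answer : Int),
    heapLoop k answer (cs.map fun x : Int => -x) = descLoop k answer cs := by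
  induction cs with
  | nil => intro k answer; rfl
  | cons c rest ih =>
    intro k answer
    simp only [List.map_cons, heapLoop, descLoop, neg_neg]
    by_cases h : k ≤ c
    · simp [h]
    · simpa [h, sub_eq_add_neg] using ih (k - c) (answer + 1)

lemma solution_eq_descLoop (k : Int) (tangerine : List Int) :
    solution k tangerine
    = descLoop k 0 (PySem.List.sorted (PySem.Dict.counter tangerine).values (fun x => x) true) := by
  unfold solution
  rw [counts_eq, PySem.Dict.foldl_insert_getD_add_one_eq_counter]
  simp only [heap_eq_sorted, sorted_neg, loops_eq]

-- ---- arithmetic: the ceiling-division closed form of one bucket ----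

lemma ceil_bounds {k c : Int} (hc : 0 < c) :
    (-(PySem.Int.floordiv (-k) c) - 1) * c < k ∧ k ≤ -(PySem.Int.floordiv (-k) c) * c :=
  (PySem.Int.neg_floordiv_neg_eq_iff_of_pos hc).mp rfl

lemma ceil_le_one_of_le {k c : Int} (hc : 0 < c) (h : k ≤ c) :
    max 1 (-(PySem.Int.floordiv (-k) c)) = 1 := by
  have hb := (ceil_bounds (k := k) hc).1
  have h1 : (-(PySem.Int.floordiv (-k) c) - 1) * c < 1 * c := by nlinarith
  have h2 := lt_of_mul_lt_mul_right h1 hc.le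
  omega

lemma ceil_sub_self {k c : Int} (hc : 0 < c) (_h : c < k) :
    -(PySem.Int.floordiv (-(k - c)) c) = -(PySem.Int.floordiv (-k) c) - 1 := by
  have hb := ceil_bounds (k := k) hc
  exact (PySem.Int.neg_floordiv_neg_eq_iff_of_pos hc).mpr ⟨by nlinarith [hb.1], by nlinarith [hb.2]⟩

lemma two_le_ceil {k c : Int} (hc : 0 < c) (h : c < k) :
    2 ≤ -(PySem.Int.floordiv (-k) c) := by
  have hb := (ceil_bounds (k := k) hc).2
  by_contra hq
  push Not at hq
  have : -(PySem.Int.floordiv (-k) c) * c ≤ 1 * c := by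
    exact mul_le_mul_of_nonneg_right (by omega) hc.le
  nlinarith

lemma descLoop_replicate_break (c : Int) (hc : 0 < c) :
    ∀ (m : Nat), 1 ≤ m → ∀ (k ans : Int) (rest : List Int), k ≤ (m : Int) * c →
      descLoop k ans (List.replicate m c ++ rest)
        = ans + max 1 (-(PySem.Int.floordiv (-k) c)) := by
  intro m
  induction m with
  | zero => omega
  | succ m ih =>
    intro _ k ans rest hk
    rw [List.replicate_succ, List.cons_append]
    by_cases h : k ≤ c
    · simp only [descLoop, if_pos h, ceil_le_one_of_le hc h]
    · push Not at h
      have hm : 1 ≤ m := by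
        rcases Nat.eq_zero_or_pos m with h0 | h1
        · subst h0; simp at hk; nlinarith
        · exact h1
      have hk' : k - c ≤ (m : Int) * c := by push_cast at hk ⊢; nlinarith
      simp only [descLoop, if_neg (not_le.mpr h)]
      rw [ih hm (k - c) (ans + 1) rest hk', ceil_sub_self hc h]
      have h2 := two_le_ceil hc h
      omega

lemma descLoop_replicate_cont (c : Int) (hc : 0 < c) :
    ∀ (m : Nat) (k ans : Int) (rest : List Int), (m : Int) * c < k →
      descLoop k ans (List.replicate m c ++ rest)
        = descLoop (k - (m : Int) * c) (ans + (m : Int)) rest := by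
  intro m
  induction m with
  | zero => intro k ans rest _; simp
  | succ m ih =>
    intro k ans rest hk
    have hmc : (0 : Int) ≤ (m : Int) * c := by positivity
    have h : ¬ k ≤ c := by push_cast at hk; nlinarith
    rw [List.replicate_succ, List.cons_append]
    simp only [descLoop, if_neg h]
    rw [ih (k - c) (ans + 1) rest (by push_cast at hk ⊢; nlinarith)]
    congr 1 <;> push_cast <;> ring

-- ---- the descending sort splits off its largest bucket ----

lemma sorted_desc_split (vs : List Int) (c : Int) (hub : ∀ v ∈ vs, v ≤ c) :
    PySem.List.sorted vs (fun x => x) true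
      = List.replicate (vs.count c) c
        ++ PySem.List.sorted (vs.filter (fun v => !(v == c))) (fun x => x) true := by
  apply List.eq_of_perm_of_sorted (le := fun a b => b ≤ a)
    (fun a b _ _ h1 h2 => le_antisymm h2 h1)
  · exact PySem.List.sorted_pairwise_rev vs (fun x => x)
  · rw [List.pairwise_append]
    refine ⟨List.pairwise_replicate.mpr (Or.inr le_rfl),
      PySem.List.sorted_pairwise_rev _ (fun x => x), ?_⟩
    intro a ha b hb
    rw [List.eq_of_mem_replicate ha]
    exact hub b (List.mem_of_mem_filter ((PySem.List.mem_sorted _ _ _ _).mp hb))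
  · refine (PySem.List.sorted_perm vs (fun x => x) true).trans ?_
    refine List.Perm.symm ?_
    rw [← List.filter_beq]
    exact (List.Perm.append_left _ (PySem.List.sorted_perm _ _ _)).trans
      (List.filter_append_perm _ vs)

-- ---- main: the bucket countdown equals the one-by-one descending scan ----

lemma bucket_desc (bucket : PySem.Dict Int Int) : ∀ (n : Nat) (vs : List Int),
    (∀ v ∈ vs, 1 ≤ v ∧ v ≤ (n : Int)) →
    (∀ c : Int, 1 ≤ c → c ≤ (n : Int) → bucket.getD c 0 = (vs.count c : Int)) →
    ∀ (k ans : Int),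
      bucketLoop bucket k ans (PySem.List.pyRange (n : Int) 0 (-1))
        = descLoop k ans (PySem.List.sorted vs (fun x => x) true) := by
  intro n
  induction n with
  | zero =>
    intro vs hel hb k ans
    have hvs : vs = [] := by
      cases vs with
      | nil => rfl
      | cons v t => have := hel v (List.mem_cons_self ..); omega
    subst hvs
    rw [PySem.List.pyRange_neg_one_eq_nil (by norm_num)]
    rfl
  | succ n ih =>
    intro vs hel hb k ans
    have hc0 : (0 : Int) < ((n + 1 : Nat) : Int) := by push_cast; omega
    rw [PySem.List.pyRange_neg_one_cons (by push_cast; omega)]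
    have hstep : ((n + 1 : Nat) : Int) - 1 = (n : Int) := by push_cast; ring
    rw [hstep]
    set c : Int := ((n + 1 : Nat) : Int) with hc
    set vs' : List Int := vs.filter (fun v => !(v == c)) with hvs'
    have hsplit := sorted_desc_split vs c (fun v hv => (hel v hv).2)
    have hm : bucket.getD c 0 = (vs.count c : Int) := hb c (by omega) le_rfl
    have hel' : ∀ v ∈ vs', 1 ≤ v ∧ v ≤ (n : Int) := by
      intro v hv
      rw [hvs', List.mem_filter] at hv
      have h1 := hel v hv.1
      have h2 : ¬(v == c) = true := by simpa using hv.2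
      simp only [beq_iff_eq] at h2
      omega
    have hb' : ∀ c' : Int, 1 ≤ c' → c' ≤ (n : Int) → bucket.getD c' 0 = (vs'.count c' : Int) := by
      intro c' h1 h2
      rw [hvs', List.count_filter (by simp; omega)]
      exact hb c' h1 (by omega)
    simp only [bucketLoop, hm]
    by_cases hz : (vs.count c : Int) = 0
    · have hz' : vs.count c = 0 := by exact_mod_cast hz
      rw [if_pos hz, hsplit, hz', List.replicate_zero, List.nil_append]
      exact ih vs' hel' hb' k ans
    · rw [if_neg hz]
      have hcnt : 1 ≤ vs.count c := by
        rcases Nat.eq_zero_or_pos (vs.count c) with h | h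
        · exact absurd (by exact_mod_cast h) hz
        · exact h
      by_cases hk : k ≤ (vs.count c : Int) * c
      · rw [if_pos hk, hsplit]
        exact (descLoop_replicate_break c hc0 (vs.count c) hcnt k ans _ hk).symm
      · rw [if_neg hk, hsplit,
          descLoop_replicate_cont c hc0 (vs.count c) k ans _ (by omega)]
        exact ih vs' hel' hb' (k - (vs.count c : Int) * c) (ans + (vs.count c : Int))

-- the values of the counter of tangerine are the positive per-kind counts, each ≤ length
lemma counter_values_bounds (tangerine : List Int) :
    ∀ v ∈ (PySem.Dict.counter tangerine).values, 1 ≤ v ∧ v ≤ (tangerine.length : Int) := by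
  intro v hv
  simp only [PySem.Dict.values, PySem.Dict.items_counter, List.map_map, List.mem_map] at hv
  obtain ⟨x, hx, hvx⟩ := hv
  have hxmem : x ∈ tangerine := (PySem.Set.mem_ofList _ _).mp hx
  have h1 : 1 ≤ tangerine.count x := List.count_pos_iff.mpr hxmem
  have h2 : tangerine.count x ≤ tangerine.length := List.count_le_length
  simp only [Function.comp] at hvx
  subst hvx
  constructor <;> exact_mod_cast ‹_›

-- ===== VERDICT (by name: the statement is the Claim_ definition above) =====
theorem solution_spec : Claim_equal_solution := by
  intro k tangerine _
  show solution k tangerine = solution_alt k tangerine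
  rw [solution_eq_descLoop]
  unfold solution_alt
  simp only [PySem.Dict.foldl_insert_getD_add_one_eq_counter]
  exact (bucket_desc _ tangerine.length _ (counter_values_bounds tangerine)
    (fun c _ _ => PySem.Dict.getD_counter _ _) k 0).symm
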